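-- pv_equiv track=rewrite | github.com/johendrickson/capstone-backend | app/helpers/weather_alerts.py | detect_dry_heat
-- ===== SOURCE A (Python) =====
-- def detect_dry_heat(forecast_temps, forecast_rain):
--     no_rain_days = 0
--     total_temp = 0
--
--     for rain, temp in zip(forecast_rain, forecast_temps):
--         if rain:
--             no_rain_days = 0
--             total_temp = 0
--         else:
--             no_rain_days += 1
--             total_temp += temp
--
--     if no_rain_days >= 3 and (total_temp / no_rain_days) >= 80:
--         return True
--     return False
-- ===== SOURCE B (Python) =====
-- def detect_dry_heat(forecast_temps, forecast_rain):
--     # Only the trailing dry streak (after the last rainy day in the zipped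
--     # prefix) matters: scan the zipped pairs from the end, collecting temps
--     # until a rainy day is hit.
--     streak = []
--     for rain, temp in reversed(list(zip(forecast_rain, forecast_temps))):
--         if rain:
--             break
--         streak.append(temp)
--     n = len(streak)
--     return n >= 3 and sum(streak) >= 80 * n
-- ===== Notes on version B (the rewrite author's own statement) =====
-- stated objective: simpler
-- what changed: Instead of folding reset/accumulate state over the whole sequence, B scans the zipped pairs from the end collecting the trailing dry streak and checks its length and integer sum (sum >= 80*n replaces the float average test, exact for integer temperatures).
import Mathlib
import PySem

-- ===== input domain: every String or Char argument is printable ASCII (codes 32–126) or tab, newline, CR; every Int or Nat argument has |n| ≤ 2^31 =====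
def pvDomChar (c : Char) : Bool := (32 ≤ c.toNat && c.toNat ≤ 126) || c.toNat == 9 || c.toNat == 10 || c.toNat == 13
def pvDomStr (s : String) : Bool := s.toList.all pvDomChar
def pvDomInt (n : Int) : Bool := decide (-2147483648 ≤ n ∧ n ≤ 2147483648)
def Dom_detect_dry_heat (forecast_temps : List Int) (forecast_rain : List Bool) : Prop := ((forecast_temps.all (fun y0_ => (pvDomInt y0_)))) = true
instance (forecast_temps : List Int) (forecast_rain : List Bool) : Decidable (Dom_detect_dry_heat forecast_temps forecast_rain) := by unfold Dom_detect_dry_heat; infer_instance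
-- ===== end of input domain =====

-- B replaces A's whole-sequence reset/accumulate fold by collecting the trailing dry streak
-- from the end of the zipped pairs (objective: simpler).


-- ===== PORT A =====
-- Each loop iteration: reset both accumulators on rain, otherwise count the day and add the temp.
def ddhStep (st : Int × Int) (p : Bool × Int) : Int × Int :=
  if p.1 then (0, 0) else (st.1 + 1, st.2 + p.2)

-- Final test: Python's float test 'total_temp / no_rain_days >= 80' is ported as the exact
-- integer inequality 80 * no_rain_days ≤ total_temp, which agrees with the float computation
-- for the integer temperatures of Dom_.
def detect_dry_heat (forecast_temps : List Int) (forecast_rain : List Bool) : Bool :=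
  let st := (forecast_rain.zip forecast_temps).foldl ddhStep (0, 0)
  if 3 ≤ st.1 ∧ 80 * st.1 ≤ st.2 then true else false

-- ===== PORT B =====
-- Collect temps from the head of the reversed zipped list until a rainy day (the 'break').
def ddhStreak : List (Bool × Int) → List Int
  | [] => []
  | (rain, temp) :: rest => if rain then [] else temp :: ddhStreak rest

def detect_dry_heat_alt (forecast_temps : List Int) (forecast_rain : List Bool) : Bool :=
  let streak := ddhStreak (forecast_rain.zip forecast_temps).reverse
  let n := streak.length
  decide (3 ≤ n) && decide (80 * (n : Int) ≤ streak.sum)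

-- ===== PRECONDITION & SPEC =====
def Spec_detect_dry_heat (forecast_temps : List Int) (forecast_rain : List Bool) (out : Bool) : Prop := out = detect_dry_heat_alt forecast_temps forecast_rain
instance (forecast_temps : List Int) (forecast_rain : List Bool) (out : Bool) : Decidable (Spec_detect_dry_heat forecast_temps forecast_rain out) := by unfold Spec_detect_dry_heat; infer_instance

-- ===== CLAIM (what is proved, stated in full; the proofs are below) =====
def Claim_equal_detect_dry_heat : Prop := ∀ (forecast_temps : List Int) (forecast_rain : List Bool), Dom_detect_dry_heat forecast_temps forecast_rain → Spec_detect_dry_heat forecast_temps forecast_rain (detect_dry_heat forecast_temps forecast_rain)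

-- ===== LEMMAS AND PROOFS =====
-- A's fold over any zipped list computes exactly the length and sum of B's trailing streak.
theorem ddh_fold_eq_streak (l : List (Bool × Int)) :
    l.foldl ddhStep (0, 0) =
      (((ddhStreak l.reverse).length : Int), (ddhStreak l.reverse).sum) := by
  induction l using List.reverseRecOn with
  | nil => rfl
  | append_singleton l x ih =>
      rcases x with ⟨rain, temp⟩
      rw [List.foldl_append, ih]
      cases rain <;> simp [ddhStep, ddhStreak, Int.add_comm]

-- ===== VERDICT (by name: the statement is the Claim_ definition above) =====
theorem detect_dry_heat_spec : Claim_equal_detect_dry_heat := by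
  intro temps rain _
  unfold Spec_detect_dry_heat detect_dry_heat detect_dry_heat_alt
  rw [ddh_fold_eq_streak]
  by_cases h3 : 3 ≤ (ddhStreak (rain.zip temps).reverse).length <;>
    by_cases h80 : 80 * ((ddhStreak (rain.zip temps).reverse).length : Int) ≤
        (ddhStreak (rain.zip temps).reverse).sum <;>
      simp [h3, h80]
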